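-- pv_equiv track=rewrite | github.com/MrBrantCode/unitest_baseline | mut_generate/mist_train_cf/cf_15834/solution.py | shuffle_array
-- ===== SOURCE A (Python) =====
-- def shuffle_array(arr):
--     arr.sort()
--     left = 0
--     right = len(arr) - 1
--     result = []
--     while left <= right:
--         result.append(arr[left])
--         left += 1
--         if left <= right:
--             result.append(arr[right])
--             right -= 1
--     return result
-- ===== SOURCE B (Python) =====
-- def shuffle_array(arr):
--     arr.sort()
--     mid = (len(arr) + 1) // 2
--     lows = arr[:mid]
--     highs = arr[mid:][::-1]
--     result = []
--     for lo, hi in zip(lows, highs):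
--         result.append(lo)
--         result.append(hi)
--     if len(lows) > len(highs):
--         result.append(lows[-1])
--     return result
-- ===== Notes on version B (the rewrite author's own statement) =====
-- stated objective: alternative
-- what changed: Replaces the two-pointer alternating while-loop with a split-and-interleave decomposition: sort, split at mid, reverse the upper half and zip-interleave the two halves, appending the middle element when the length is odd.
import Mathlib
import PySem

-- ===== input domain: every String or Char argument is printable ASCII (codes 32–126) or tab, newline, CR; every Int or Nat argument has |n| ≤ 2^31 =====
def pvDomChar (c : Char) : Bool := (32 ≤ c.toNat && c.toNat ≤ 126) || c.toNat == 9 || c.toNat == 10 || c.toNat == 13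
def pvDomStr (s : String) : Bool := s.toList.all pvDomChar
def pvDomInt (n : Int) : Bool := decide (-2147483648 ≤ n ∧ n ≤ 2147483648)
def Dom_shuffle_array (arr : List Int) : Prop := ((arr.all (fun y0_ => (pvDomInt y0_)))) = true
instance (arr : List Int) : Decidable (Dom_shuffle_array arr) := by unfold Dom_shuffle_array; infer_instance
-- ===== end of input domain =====

-- B replaces A's two-pointer alternating walk by sort, split at mid, reverse the upper half and
-- zip-interleave (same cost); like A, B sorts the argument list in place (same mutation; the
-- equivalence proved here is about the return value).


-- ===== PORT A =====
-- the while-loop; indices are always in range when reached, so `(pyGet? …).getD 0` is exact here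
def loopA (s : List Int) (left right : Int) : List Int :=
  if _h1 : left ≤ right then
    ((PySem.List.pyGet? s left).getD 0) ::
      (if _h2 : left + 1 ≤ right then
        ((PySem.List.pyGet? s right).getD 0) :: loopA s (left + 1) (right - 1)
      else [])
  else []
termination_by (right + 1 - left).toNat
decreasing_by omega

def shuffle_array (arr : List Int) : List Int :=
  let s := PySem.List.sorted arr (fun x => x) false
  loopA s 0 ((s.length : Int) - 1)

-- ===== PORT B =====
def shuffle_array_alt (arr : List Int) : List Int :=
  let s := PySem.List.sorted arr (fun x => x) false
  let mid := PySem.Int.floordiv ((s.length : Int) + 1) 2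
  let lows := PySem.List.slice s (some 0) (some mid)
  let highs := (PySem.List.slice s (some mid) none).reverse
  let result := (lows.zip highs).foldl (fun acc p => acc ++ [p.1, p.2]) []
  if highs.length < lows.length then result ++ [(PySem.List.pyGet? lows (-1)).getD 0]
  else result

-- ===== PRECONDITION & SPEC =====
def Spec_shuffle_array (arr : List Int) (out : List Int) : Prop := out = shuffle_array_alt arr
instance (arr : List Int) (out : List Int) : Decidable (Spec_shuffle_array arr out) := by unfold Spec_shuffle_array; infer_instance

-- ===== CLAIM (what is proved, stated in full; the proofs are below) =====
def Claim_equal_shuffle_array : Prop := ∀ (arr : List Int), Dom_shuffle_array arr → Spec_shuffle_array arr (shuffle_array arr)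

-- ===== LEMMAS AND PROOFS =====

-- common specification: front-back interleaving of a list, eating one element from each end
def g : List Int → List Int
  | [] => []
  | [x] => [x]
  | x :: y :: xs => x :: ((y :: xs).getLast!) :: g ((y :: xs).dropLast)
termination_by l => l.length
decreasing_by simp

theorem g_concat (x y : Int) (m : List Int) : g (x :: (m ++ [y])) = x :: y :: g m := by
  cases m with
  | nil => simp only [List.nil_append]; rw [g]; simp [g]
  | cons z zs =>
    simp only [List.cons_append]
    rw [g]
    have h1 : (z :: (zs ++ [y])).getLast? = some y := by
      show ((z :: zs) ++ [y]).getLast? = some y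
      exact List.getLast?_concat
    have h2 : (z :: (zs ++ [y])).dropLast = z :: zs := by
      show ((z :: zs) ++ [y]).dropLast = z :: zs
      exact List.dropLast_concat
    simp [List.getLast!_eq_getLast?_getD, h1, h2]

theorem loopA_seg (k : Nat) : ∀ (pre m post : List Int), m.length = k →
    loopA (pre ++ m ++ post) (pre.length : Int) ((pre.length : Int) + m.length - 1) = g m := by
  induction k using Nat.strong_induction_on with
  | _ k ih =>
    intro pre m post hk
    rcases m.eq_nil_or_concat with hm | ⟨m1, y, hm⟩
    · subst hm
      rw [loopA, g, dif_neg (by simp)]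
    · subst hm
      simp only [List.concat_eq_append] at hk ⊢
      cases m1 with
      | nil =>
        simp only [List.nil_append] at hk ⊢
        rw [loopA]
        have h1 : (pre.length : Int) ≤ (pre.length : Int) + (([y] : List Int).length : Int) - 1 := by
          simp
        have h2 : ¬ ((pre.length : Int) + 1 ≤ (pre.length : Int) + (([y] : List Int).length : Int) - 1) := by
          simp
        rw [dif_pos h1, dif_neg h2, g]
        rw [show pre ++ [y] ++ post = pre ++ (y :: post) by simp,
          PySem.List.pyGet?_append_length]
        rfl
      | cons x m2 =>
        rw [loopA]
        have hlen : ((x :: m2) ++ [y]).length = m2.length + 2 := by simp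
        have h1 : (pre.length : Int) ≤ (pre.length : Int) + (((x :: m2) ++ [y]).length : Int) - 1 := by
          rw [hlen]; push_cast; omega
        have h2 : (pre.length : Int) + 1 ≤ (pre.length : Int) + (((x :: m2) ++ [y]).length : Int) - 1 := by
          rw [hlen]; push_cast; omega
        rw [dif_pos h1, dif_pos h2]
        have e1 : PySem.List.pyGet? (pre ++ ((x :: m2) ++ [y]) ++ post) (pre.length : Int) = some x := by
          simpa using PySem.List.pyGet?_append_length pre (m2 ++ y :: post) x
        have e2 : PySem.List.pyGet? (pre ++ ((x :: m2) ++ [y]) ++ post)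
            ((pre.length : Int) + (((x :: m2) ++ [y]).length : Int) - 1) = some y := by
          have hidx : (pre.length : Int) + (((x :: m2) ++ [y]).length : Int) - 1
              = ((pre ++ (x :: m2)).length : Int) := by simp; push_cast; ring
          rw [hidx]
          simpa using PySem.List.pyGet?_append_length (pre ++ x :: m2) post y
        have erec : loopA (pre ++ ((x :: m2) ++ [y]) ++ post) ((pre.length : Int) + 1)
            ((pre.length : Int) + (((x :: m2) ++ [y]).length : Int) - 1 - 1) = g m2 := by
          have hre : pre ++ ((x :: m2) ++ [y]) ++ post = (pre ++ [x]) ++ m2 ++ ([y] ++ post) := by simp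
          have hl : (pre.length : Int) + 1 = ((pre ++ [x]).length : Int) := by simp
          have hr : (pre.length : Int) + (((x :: m2) ++ [y]).length : Int) - 1 - 1
              = ((pre ++ [x]).length : Int) + (m2.length : Int) - 1 := by
            rw [hlen]; push_cast; simp; ring
          rw [hre, hl, hr]
          exact ih m2.length (by simp at hk; omega) (pre ++ [x]) m2 ([y] ++ post) rfl
        rw [e1, e2, erec]
        rw [show (x :: m2) ++ [y] = x :: (m2 ++ [y]) by simp, g_concat]
        rfl

-- B's construction, written over take/drop on the sorted list
def bcore (s : List Int) : List Int :=
  (((s.take ((s.length + 1) / 2)).zip ((s.drop ((s.length + 1) / 2)).reverse)).flatMap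
      (fun p => [p.1, p.2])) ++
    (if (s.drop ((s.length + 1) / 2)).reverse.length < (s.take ((s.length + 1) / 2)).length then
      [(s.take ((s.length + 1) / 2)).getLast?.getD 0]
    else [])

theorem bcore_eq_g (k : Nat) : ∀ (m : List Int), m.length = k → bcore m = g m := by
  induction k using Nat.strong_induction_on with
  | _ k ih =>
    intro m hk
    cases m with
    | nil => rw [g]; simp [bcore]
    | cons x xs =>
      rcases xs.eq_nil_or_concat with hx | ⟨m1, y, hx⟩
      · subst hx; rw [g]; simp [bcore]
      · subst hx
        simp only [List.concat_eq_append] at hk ⊢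
        have hmid : ((x :: (m1 ++ [y])).length + 1) / 2 = (m1.length + 1) / 2 + 1 := by
          simp; omega
        have hle : (m1.length + 1) / 2 ≤ m1.length := by omega
        have htake : (x :: (m1 ++ [y])).take (((x :: (m1 ++ [y])).length + 1) / 2)
            = x :: m1.take ((m1.length + 1) / 2) := by
          rw [hmid, List.take_succ_cons, List.take_append_of_le_length hle]
        have hdrop : (x :: (m1 ++ [y])).drop (((x :: (m1 ++ [y])).length + 1) / 2)
            = m1.drop ((m1.length + 1) / 2) ++ [y] := by
          rw [hmid, List.drop_succ_cons, List.drop_append_of_le_length hle]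
        have hrec : bcore m1 = g m1 := ih m1.length (by simp at hk; omega) m1 rfl
        rw [g_concat, ← hrec]
        unfold bcore
        rw [htake, hdrop]
        simp only [List.reverse_append, List.reverse_singleton, List.singleton_append,
          List.zip_cons_cons, List.flatMap_cons]
        have hcond : ((y :: (m1.drop ((m1.length + 1) / 2)).reverse).length <
            (x :: m1.take ((m1.length + 1) / 2)).length) ↔
            ((m1.drop ((m1.length + 1) / 2)).reverse.length < (m1.take ((m1.length + 1) / 2)).length) := by
          simp
        by_cases hodd : (m1.drop ((m1.length + 1) / 2)).reverse.length < (m1.take ((m1.length + 1) / 2)).length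
        · rw [if_pos (hcond.mpr hodd), if_pos hodd]
          cases ht : m1.take ((m1.length + 1) / 2) with
          | nil => rw [ht] at hodd; simp at hodd
          | cons z t' => rw [List.getLast?_cons_cons]; simp
        · rw [if_neg (fun h => hodd (hcond.mp h)), if_neg hodd]
          simp

theorem alt_eq_bcore (arr : List Int) :
    shuffle_array_alt arr = bcore (PySem.List.sorted arr (fun x => x) false) := by
  have hmid : PySem.Int.floordiv ((((PySem.List.sorted arr (fun x => x) false).length) : Int) + 1) 2
      = ((((PySem.List.sorted arr (fun x => x) false).length + 1) / 2 : Nat) : Int) := by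
    have := PySem.Int.floordiv_natCast ((PySem.List.sorted arr (fun x => x) false).length + 1) 2
    push_cast at this ⊢
    exact this
  simp only [shuffle_array_alt, bcore, hmid, PySem.List.slice_zero_start,
    PySem.List.slice_to_natCast, PySem.List.slice_from_natCast,
    PySem.List.foldl_append_eq_flatMap, PySem.List.pyGet?_neg_one, List.nil_append]
  split <;> simp

-- ===== VERDICT (by name: the statement is the Claim_ definition above) =====
theorem shuffle_array_spec : Claim_equal_shuffle_array := by
  intro arr _
  unfold Spec_shuffle_array
  rw [alt_eq_bcore, bcore_eq_g _ _ rfl]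
  simp only [shuffle_array]
  have := loopA_seg (PySem.List.sorted arr (fun x => x) false).length ([])
    (PySem.List.sorted arr (fun x => x) false) ([]) rfl
  simpa using this
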